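-- pv_equiv track=rewrite | github.com/As1i1/Competitive-programming | DM2022/Lab1/H.py | build
-- ===== SOURCE A (Python) =====
-- def getor(x, y):
--     return f"(({x}|{x})|({y}|{y}))"
--
-- def build(t):
--     if t == 0:
--         return "((A0|B0)|(A0|B0))"
--     s1 = build(t - 1)
--     x = f"A{t}"
--     y = f"B{t}"
--     s = f"(({s1}|{getor(x, y)})|({x}|{y}))"
--     # if t % 2 == 1:
--     #     s = f"({s1}|{getor(x, y)})|({x}|{y})"
--     # else:
--     #     tmp1 = getor(x, y)
--     #     tmp2 = getand(x, y)
--     #     s = f"{getor(getand(s1, tmp1), tmp2)}"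
--     return s
-- ===== SOURCE B (Python) =====
-- def getor(x, y):
--     return f"(({x}|{x})|({y}|{y}))"
--
-- def build(t):
--     s = "((A0|B0)|(A0|B0))"
--     for i in range(1, t + 1):
--         x = f"A{i}"
--         y = f"B{i}"
--         s = f"(({s}|{getor(x, y)})|({x}|{y}))"
--     return s
-- ===== Notes on version B (the rewrite author's own statement) =====
-- stated objective: simpler
-- what changed: Replaces the top-down recursion with a bottom-up loop that folds the same rebuilding step from the base case up to t, avoiding recursion (and Python's recursion-depth limit).
-- crash fix: For t < 0 A recurses forever and raises RecursionError; B's loop body never runs and it returns the base string "((A0|B0)|(A0|B0))". — e.g. on build(-1): A raises RecursionError, B returns "((A0|B0)|(A0|B0))"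
import Mathlib
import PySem

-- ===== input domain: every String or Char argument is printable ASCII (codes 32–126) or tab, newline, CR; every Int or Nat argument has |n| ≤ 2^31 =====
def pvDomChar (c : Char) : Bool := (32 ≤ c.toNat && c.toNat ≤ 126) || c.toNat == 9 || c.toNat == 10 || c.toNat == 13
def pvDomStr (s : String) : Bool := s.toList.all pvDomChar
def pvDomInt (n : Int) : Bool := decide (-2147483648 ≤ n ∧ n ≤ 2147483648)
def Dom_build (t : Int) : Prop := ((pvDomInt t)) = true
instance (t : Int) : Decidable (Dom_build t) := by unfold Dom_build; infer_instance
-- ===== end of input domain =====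

-- B replaces A's top-down recursion with a bottom-up loop folding the same step from the base case up to t (no speed claim).
-- ===== PORT A =====
def getorA (x y : String) : String :=
  "((" ++ x ++ "|" ++ x ++ ")|(" ++ y ++ "|" ++ y ++ "))"

-- A's recursion on t: for t ≥ 0 (the only t inside Pre_build) it unwinds exactly t times;
-- realised as structural recursion on t.toNat.
def buildRec : Nat → String
  | 0 => "((A0|B0)|(A0|B0))"
  | n + 1 =>
    let s1 := buildRec n
    let x := "A" ++ PySem.Int.toStr ((n : Int) + 1)
    let y := "B" ++ PySem.Int.toStr ((n : Int) + 1)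
    "((" ++ s1 ++ "|" ++ getorA x y ++ ")|(" ++ x ++ "|" ++ y ++ "))"

def build (t : Int) : String := buildRec t.toNat

-- ===== PORT B =====
def stepB (s : String) (i : Int) : String :=
  let x := "A" ++ PySem.Int.toStr i
  let y := "B" ++ PySem.Int.toStr i
  "((" ++ s ++ "|" ++ getorA x y ++ ")|(" ++ x ++ "|" ++ y ++ "))"

def build_alt (t : Int) : String :=
  (PySem.List.pyRange 1 (t + 1) 1).foldl stepB "((A0|B0)|(A0|B0))"

-- ===== PRECONDITION & SPEC =====
-- Pre_ excludes t < 0, on which A recurses forever (RecursionError); A returns on exactly t ≥ 0.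
def Pre_build (t : Int) : Prop := 0 ≤ t
instance (t : Int) : Decidable (Pre_build t) := by unfold Pre_build; infer_instance
def pvWitness_build : Int := (3)

-- For t < 0 A recurses forever and raises RecursionError; B's loop body never runs and it returns the base string.
def Raises_build (t : Int) : Prop := t < 0
instance (t : Int) : Decidable (Raises_build t) := by unfold Raises_build; infer_instance
def pvRaiseWitness_build : Int := (-1)
def pvRaiseWitnessOut_build : String := "((A0|B0)|(A0|B0))"

def Spec_build (t : Int) (out : String) : Prop := out = build_alt t
instance (t : Int) (out : String) : Decidable (Spec_build t out) := by unfold Spec_build; infer_instance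

-- ===== CLAIM (what is proved, stated in full; the proofs are below) =====
def Claim_equal_build : Prop := ∀ (t : Int), Dom_build t → Pre_build t → Spec_build t (build t)
def Claim_raises_build : Prop := (∀ (t : Int), Dom_build t → Raises_build t → ¬ Pre_build t) ∧ (Dom_build (pvRaiseWitness_build) ∧ Raises_build (pvRaiseWitness_build) ∧ build_alt (pvRaiseWitness_build) = pvRaiseWitnessOut_build)

-- ===== LEMMAS AND PROOFS =====
lemma foldl_eq_buildRec (n : Nat) :
    (PySem.List.pyRange 1 ((n : Int) + 1) 1).foldl stepB "((A0|B0)|(A0|B0))" = buildRec n := by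
  induction n with
  | zero => rw [PySem.List.pyRange_one_eq_nil (by norm_num)]; rfl
  | succ n ih =>
    have h : ((n : Int) + 1 + 1) = ((n : Int) + 1) + 1 := by ring
    rw [show (((n + 1 : Nat) : Int) + 1) = ((n : Int) + 1) + 1 by push_cast; ring,
        PySem.List.pyRange_one_succ_right (by omega), List.foldl_append, ih]
    rfl

-- ===== VERDICT (by name: the statement is the Claim_ definition above) =====
theorem build_spec : Claim_equal_build := by
  intro t _ ht
  unfold Spec_build build build_alt
  have h := foldl_eq_buildRec t.toNat
  rw [Int.toNat_of_nonneg ht] at h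
  exact h.symm

theorem build_raises : Claim_raises_build := by
  unfold Claim_raises_build
  refine ⟨fun t _ h hp => ?_, by decide⟩
  unfold Raises_build at h
  unfold Pre_build at hp
  omega

-- witness self-check: B's port really returns the stated value at the raise witness
theorem build_raise_witness_ok : build_alt pvRaiseWitness_build = pvRaiseWitnessOut_build :=
  build_raises.2.2.2
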